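-- pv_equiv track=rewrite | github.com/awecode/awecount | server/django/apps/report/api.py | merge_dict_lists
-- ===== SOURCE A (Python) =====
-- def merge_dict_lists(lists, k):
--     merged_data = {}
--     for lst in lists:
--         for dct in lst:
--             current_id = dct[k]
--             if current_id in merged_data:
--                 merged_data[current_id].update(dct)
--             else:
--                 merged_data[current_id] = dct
--
--     merged_list = list(merged_data.values())
--     return merged_list
-- ===== SOURCE B (Python) =====
-- # B: two-pass decomposition — first group dicts by dct[k] preserving first-appearance
-- # order, then merge each bucket into its first dict.  Same return value as A; like A,
-- # the first-seen dict per key is updated in place (mutation equivalence preserved).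
-- def _merge_bucket(bucket):
--     head = bucket[0]
--     for dct in bucket[1:]:
--         head.update(dct)
--     return head
--
--
-- def merge_dict_lists(lists, k):
--     groups = {}
--     for lst in lists:
--         for dct in lst:
--             groups.setdefault(dct[k], []).append(dct)
--     merged_list = []
--     for bucket in groups.values():
--         merged_list.append(_merge_bucket(bucket))
--     return merged_list
-- ===== Notes on version B (the rewrite author's own statement) =====
-- stated objective: alternative
-- what changed: A interleaves merging into one dict-of-merged-dicts inside a single nested loop; B first builds an ordered grouping index from key value to the bucket of dicts sharing it, then in a separate pass merges each bucket into its first dict.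
import Mathlib
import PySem

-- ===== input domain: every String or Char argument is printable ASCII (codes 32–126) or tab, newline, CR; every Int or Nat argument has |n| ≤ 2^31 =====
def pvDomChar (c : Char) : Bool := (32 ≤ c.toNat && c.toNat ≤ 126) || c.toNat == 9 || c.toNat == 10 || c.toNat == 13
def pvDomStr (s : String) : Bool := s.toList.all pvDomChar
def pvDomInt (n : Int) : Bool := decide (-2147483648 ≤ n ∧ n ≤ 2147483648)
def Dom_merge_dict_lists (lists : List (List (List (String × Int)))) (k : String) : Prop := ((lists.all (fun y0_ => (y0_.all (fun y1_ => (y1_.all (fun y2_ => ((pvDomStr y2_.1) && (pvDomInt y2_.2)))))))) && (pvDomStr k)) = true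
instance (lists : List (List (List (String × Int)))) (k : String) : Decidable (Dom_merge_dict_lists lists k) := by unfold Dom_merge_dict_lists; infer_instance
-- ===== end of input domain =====

-- B differs from A by decomposition: one grouping pass, then a per-bucket merge pass
-- (equivalence is about the RETURN value; both Pythons update the first-seen dict per
-- key in place, producing the same mutations).

-- ===== PORT A =====
-- dct[k]: first-match lookup; Pre_ guarantees the key is present (Python raises
-- KeyError where it is absent — those inputs are excluded by Pre_, so the 0 default
-- is never the claimed value).
def merge_dict_lists (lists : List (List (List (String × Int)))) (k : String) : List (List (String × Int)) :=
  let merged_data : PySem.Dict Int (PySem.Dict String Int) :=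
    lists.foldl (fun merged_data lst =>
      lst.foldl (fun merged_data dct =>
        let current_id := (PySem.Dict.mk dct).getD k 0
        if merged_data.contains current_id then
          merged_data.modify current_id (PySem.Dict.mk []) (fun d => d.update dct)
        else
          merged_data.insert current_id (PySem.Dict.mk dct)) merged_data) PySem.Dict.empty
  merged_data.values.map PySem.Dict.items

-- ===== PORT B =====
-- helper _merge_bucket of Source B: head = bucket[0]; head.update(dct) for dct in bucket[1:]
def pvMergeBucket (bucket : List (List (String × Int))) : PySem.Dict String Int :=
  match bucket with
  | [] => PySem.Dict.mk []        -- unreachable: buckets are never empty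
  | head :: rest => rest.foldl (fun head dct => head.update dct) (PySem.Dict.mk head)

def merge_dict_lists_alt (lists : List (List (List (String × Int)))) (k : String) : List (List (String × Int)) :=
  let groups : PySem.Dict Int (List (List (String × Int))) :=
    lists.foldl (fun groups lst =>
      lst.foldl (fun groups dct =>
        groups.modify ((PySem.Dict.mk dct).getD k 0) [] (fun b => b ++ [dct])) groups) PySem.Dict.empty
  groups.values.map (fun bucket => (pvMergeBucket bucket).items)

-- ===== PRECONDITION & SPEC =====
-- Pre_ excludes exactly the inputs on which Python A raises KeyError: some dict lacks key k.
def Pre_merge_dict_lists (lists : List (List (List (String × Int)))) (k : String) : Prop :=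
  ∀ lst ∈ lists, ∀ dct ∈ lst, k ∈ dct.map Prod.fst
instance (lists : List (List (List (String × Int)))) (k : String) : Decidable (Pre_merge_dict_lists lists k) := by unfold Pre_merge_dict_lists; infer_instance

def pvWitness_merge_dict_lists : (List (List (List (String × Int)))) × String :=
  ([[[("id", 1), ("a", 2)]], [[("id", 1), ("b", 3)], [("id", 2), ("a", 5)]]], "id")

def Spec_merge_dict_lists (lists : List (List (List (String × Int)))) (k : String) (out : List (List (String × Int))) : Prop := out = merge_dict_lists_alt lists k
instance (lists : List (List (List (String × Int)))) (k : String) (out : List (List (String × Int))) : Decidable (Spec_merge_dict_lists lists k out) := by unfold Spec_merge_dict_lists; infer_instance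

-- ===== CLAIM (what is proved, stated in full; the proofs are below) =====
def Claim_equal_merge_dict_lists : Prop := ∀ (lists : List (List (List (String × Int)))) (k : String), Dom_merge_dict_lists lists k → Pre_merge_dict_lists lists k → Spec_merge_dict_lists lists k (merge_dict_lists lists k)

-- ===== LEMMAS AND PROOFS =====

-- the loop bodies of the two ports, over a single dict
def pvStepA (k : String) (md : PySem.Dict Int (PySem.Dict String Int)) (dct : List (String × Int)) : PySem.Dict Int (PySem.Dict String Int) :=
  let current_id := (PySem.Dict.mk dct).getD k 0
  if md.contains current_id then
    md.modify current_id (PySem.Dict.mk []) (fun d => d.update dct)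
  else
    md.insert current_id (PySem.Dict.mk dct)

def pvStepB (k : String) (g : PySem.Dict Int (List (List (String × Int)))) (dct : List (String × Int)) : PySem.Dict Int (List (List (String × Int))) :=
  g.modify ((PySem.Dict.mk dct).getD k 0) [] (fun b => b ++ [dct])

-- the invariant tying A's state to B's state: A's merged dict per key is the merge of
-- B's bucket for that key, in the same position; buckets are never empty
def pvInv (g : PySem.Dict Int (List (List (String × Int)))) (md : PySem.Dict Int (PySem.Dict String Int)) : Prop :=
  md.items = g.items.map (fun p => (p.1, pvMergeBucket p.2)) ∧ ∀ p ∈ g.items, p.2 ≠ []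

lemma pvMergeBucket_append (b : List (List (String × Int))) (dct : List (String × Int)) (hb : b ≠ []) :
    pvMergeBucket (b ++ [dct]) = (pvMergeBucket b).update dct := by
  cases b with
  | nil => exact absurd rfl hb
  | cons h t => simp [pvMergeBucket, List.foldl_append]

lemma pvStep_inv (k : String) (g : PySem.Dict Int (List (List (String × Int)))) (md : PySem.Dict Int (PySem.Dict String Int))
    (hinv : pvInv g md) (dct : List (String × Int)) : pvInv (pvStepB k g dct) (pvStepA k md dct) := by
  obtain ⟨h1, h2⟩ := hinv
  set c := (PySem.Dict.mk dct).getD k 0 with hc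
  have hPA : ((fun (p : Int × PySem.Dict String Int) => p.1 == c) ∘
      (fun (p : Int × List (List (String × Int))) => (p.1, pvMergeBucket p.2)))
      = fun (p : Int × List (List (String × Int))) => p.1 == c := rfl
  have hkeys : md.contains c = g.contains c := by
    rw [PySem.Dict.contains, PySem.Dict.contains, h1, List.any_map, hPA]
  by_cases hcon : g.contains c = true
  · -- key already present: both ports overwrite the entry in place
    have hmc : md.contains c = true := by rw [hkeys]; exact hcon
    have hex : ∃ x ∈ g.items, x.1 == c := by
      simpa [PySem.Dict.contains, List.any_eq_true] using hcon
    rcases hf : List.find? (fun p => p.1 == c) g.items with _ | pb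
    · obtain ⟨x, hx, hxc⟩ := hex
      exact absurd hxc (by simpa using List.find?_eq_none.mp hf x hx)
    have hmdfind : List.find? (fun p => p.1 == c) md.items
        = some (pb.1, pvMergeBucket pb.2) := by
      rw [h1, List.find?_map, hPA, hf]; rfl
    have hmdgetD : md.getD c (PySem.Dict.mk []) = pvMergeBucket pb.2 := by
      simp [PySem.Dict.getD, PySem.Dict.get?, hmdfind]
    have hggetD : g.getD c [] = pb.2 := by
      simp [PySem.Dict.getD, PySem.Dict.get?, hf]
    have hpbne : pb.2 ≠ [] := h2 pb (List.mem_of_find?_eq_some hf)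
    constructor
    · simp only [pvStepA, pvStepB, PySem.Dict.modify, ← hc]
      rw [if_pos hmc, PySem.Dict.items_insert, PySem.Dict.items_insert,
        if_pos hmc, if_pos hcon, h1, List.map_map, List.map_map]
      apply List.map_congr_left
      intro p hp
      by_cases hpc : (p.1 == c) = true
      · simp [Function.comp, hpc, hmdgetD, hggetD, pvMergeBucket_append _ _ hpbne]
      · simp [Function.comp, hpc]
    · intro p hp
      simp only [pvStepB, PySem.Dict.modify, ← hc, PySem.Dict.items_insert] at hp
      rw [if_pos hcon] at hp
      obtain ⟨q, hq, hqe⟩ := List.mem_map.mp hp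
      by_cases hqc : (q.1 == c) = true
      · rw [if_pos hqc] at hqe
        subst hqe
        simp [hggetD, hpbne]
      · rw [if_neg hqc] at hqe
        subst hqe
        exact h2 q hq
  · -- new key: both ports append a fresh entry
    have hmcF : ¬ (md.contains c = true) := by rw [hkeys]; exact hcon
    have hgf : List.find? (fun p => p.1 == c) g.items = none := by
      rw [List.find?_eq_none]
      intro x hx hxc
      exact hcon (by rw [PySem.Dict.contains]; exact List.any_eq_true.mpr ⟨x, hx, hxc⟩)
    have hggetD : g.getD c [] = [] := by
      simp [PySem.Dict.getD, PySem.Dict.get?, hgf]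
    constructor
    · simp only [pvStepA, pvStepB, PySem.Dict.modify, ← hc]
      rw [if_neg hmcF, PySem.Dict.items_insert, PySem.Dict.items_insert,
        if_neg hmcF, if_neg hcon, h1, List.map_append, hggetD]
      rfl
    · intro p hp
      simp only [pvStepB, PySem.Dict.modify, ← hc, PySem.Dict.items_insert] at hp
      rw [if_neg hcon] at hp
      rcases List.mem_append.mp hp with h | h
      · exact h2 p h
      · simp only [List.mem_singleton] at h
        subst h
        simp

lemma pvFold_inv (k : String) (l : List (List (String × Int)))
    (g : PySem.Dict Int (List (List (String × Int)))) (md : PySem.Dict Int (PySem.Dict String Int))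
    (hinv : pvInv g md) : pvInv (l.foldl (pvStepB k) g) (l.foldl (pvStepA k) md) := by
  induction l generalizing g md with
  | nil => exact hinv
  | cons d t ih => exact ih _ _ (pvStep_inv k g md hinv d)

-- ===== VERDICT (by name: the statement is the Claim_ definition above) =====
theorem merge_dict_lists_spec : Claim_equal_merge_dict_lists := by
  intro lists k _ _
  unfold Spec_merge_dict_lists merge_dict_lists merge_dict_lists_alt
  have hA : lists.foldl (fun merged_data lst =>
        lst.foldl (fun merged_data dct =>
          let current_id := (PySem.Dict.mk dct).getD k 0
          if merged_data.contains current_id then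
            merged_data.modify current_id (PySem.Dict.mk []) (fun d => d.update dct)
          else
            merged_data.insert current_id (PySem.Dict.mk dct)) merged_data)
        (PySem.Dict.empty : PySem.Dict Int (PySem.Dict String Int))
        = lists.flatten.foldl (pvStepA k) PySem.Dict.empty := by
    rw [List.foldl_flatten]; rfl
  have hB : lists.foldl (fun groups lst =>
        lst.foldl (fun groups dct =>
          groups.modify ((PySem.Dict.mk dct).getD k 0) [] (fun b => b ++ [dct])) groups)
        (PySem.Dict.empty : PySem.Dict Int (List (List (String × Int))))
        = lists.flatten.foldl (pvStepB k) PySem.Dict.empty := by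
    rw [List.foldl_flatten]; rfl
  rw [hA, hB]
  obtain ⟨h1, -⟩ := pvFold_inv k lists.flatten PySem.Dict.empty PySem.Dict.empty
    ⟨rfl, by intro p hp; simp [PySem.Dict.empty] at hp⟩
  simp [PySem.Dict.values, h1, List.map_map, Function.comp]
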